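-- pv_equiv track=rewrite | github.com/Sarak-Igor/Agente_ingles_traducao_exercicios | backend/app/api/routes/practice.py | normalize_semantic
-- ===== SOURCE A (Python) =====
-- EQUIVALENT_WORDS = {
--     # Demonstrativos
--     'este': ['esse', 'aquele'],
--     'esse': ['este', 'aquele'],
--     'esta': ['essa', 'aquela'],
--     'essa': ['esta', 'aquela'],
--     'estes': ['esses', 'aqueles'],
--     'esses': ['estes', 'aqueles'],
--     'estas': ['essas', 'aquelas'],
--     'essas': ['estas', 'aquelas'],
--     # Pronomes pessoais
--     'você': ['tu', 'voce'],
--     'tu': ['você', 'voce'],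
--     'voce': ['você', 'tu'],
--     'vocês': ['vós', 'voces'],
--     'vós': ['vocês', 'voces'],
--     # Artigos (em alguns contextos)
--     'o': ['a'],
--     'a': ['o'],
--     'os': ['as'],
--     'as': ['os'],
--     # Contração comum
--     'na': ['no'],
--     'no': ['na'],
--     'da': ['do'],
--     'do': ['da'],
--     # Inglês
--     'this': ['that', 'these', 'those'],
--     'that': ['this', 'these', 'those'],
--     'these': ['this', 'that', 'those'],
--     'those': ['this', 'that', 'these'],
-- }
--
-- def normalize_semantic(text: str) -> str:
--     """
--     Normaliza texto considerando sinônimos e palavras equivalentes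
--     Substitui palavras por suas formas canônicas
--     """
--     words = text.lower().split()
--     normalized = []
--
--     for word in words:
--         # Remove acentos básicos para comparação
--         word_clean = word.strip()
--
--         # Verifica se a palavra tem equivalentes
--         found_equivalent = False
--         for canonical, equivalents in EQUIVALENT_WORDS.items():
--             if word_clean == canonical or word_clean in equivalents:
--                 normalized.append(canonical)
--                 found_equivalent = True
--                 break
--
--         if not found_equivalent:
--             normalized.append(word_clean)
--
--     return ' '.join(normalized)
-- ===== SOURCE B (Python) =====
-- # Same mapping expressed as disjoint synonym groups: every word in a group is
-- # replaced by the group's first (canonical) member; a reverse table is built once,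
-- # then one dict lookup per word.
-- SYNONYM_GROUPS = [
--     ["este", "esse", "aquele"],
--     ["esta", "essa", "aquela"],
--     ["estes", "esses", "aqueles"],
--     ["estas", "essas", "aquelas"],
--     ["você", "tu", "voce"],
--     ["vocês", "vós", "voces"],
--     ["o", "a"],
--     ["os", "as"],
--     ["na", "no"],
--     ["da", "do"],
--     ["this", "that", "these", "those"],
-- ]
--
-- _CANON = {}
-- for _group in SYNONYM_GROUPS:
--     _canonical = _group[0]
--     for _w in _group:
--         _CANON[_w] = _canonical
--
--
-- def normalize_semantic(text: str) -> str:
--     """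
--     Normaliza texto considerando sinônimos e palavras equivalentes
--     Substitui palavras por suas formas canônicas
--     """
--     return ' '.join(_CANON.get(w, w) for w in text.lower().split())
-- ===== Notes on version B (the rewrite author's own statement) =====
-- stated objective: alternative
-- what changed: Replaces the per-word linear scan over the canonical->equivalents dict (with a found-flag and break) by disjoint synonym groups from which a reverse word->canonical table is built once, so each word is one hash lookup in a single pass.
import Mathlib
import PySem

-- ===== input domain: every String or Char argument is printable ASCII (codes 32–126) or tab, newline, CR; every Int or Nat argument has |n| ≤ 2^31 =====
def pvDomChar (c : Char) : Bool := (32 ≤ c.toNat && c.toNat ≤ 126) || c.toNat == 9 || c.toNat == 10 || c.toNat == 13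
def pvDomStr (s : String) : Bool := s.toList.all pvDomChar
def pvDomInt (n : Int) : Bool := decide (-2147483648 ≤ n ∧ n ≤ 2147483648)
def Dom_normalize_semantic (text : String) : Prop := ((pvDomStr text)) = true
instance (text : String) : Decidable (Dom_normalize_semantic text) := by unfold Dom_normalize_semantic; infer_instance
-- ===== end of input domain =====

-- B expresses the mapping as disjoint synonym groups, builds a reverse word->canonical
-- table once, and does one lookup per word; equal return value on all inputs.

-- ===== PORT A =====
def EQUIVALENT_WORDS : List (String × List String) := [
  ("este", ["esse", "aquele"]),
  ("esse", ["este", "aquele"]),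
  ("esta", ["essa", "aquela"]),
  ("essa", ["esta", "aquela"]),
  ("estes", ["esses", "aqueles"]),
  ("esses", ["estes", "aqueles"]),
  ("estas", ["essas", "aquelas"]),
  ("essas", ["estas", "aquelas"]),
  ("você", ["tu", "voce"]),
  ("tu", ["você", "voce"]),
  ("voce", ["você", "tu"]),
  ("vocês", ["vós", "voces"]),
  ("vós", ["vocês", "voces"]),
  ("o", ["a"]),
  ("a", ["o"]),
  ("os", ["as"]),
  ("as", ["os"]),
  ("na", ["no"]),
  ("no", ["na"]),
  ("da", ["do"]),
  ("do", ["da"]),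
  ("this", ["that", "these", "those"]),
  ("that", ["this", "these", "those"]),
  ("these", ["this", "that", "those"]),
  ("those", ["this", "that", "these"])]

-- A's inner 'for canonical, equivalents in EQUIVALENT_WORDS.items(): … break' loop
def findEquiv : List (String × List String) → String → Option String
  | [], _ => none
  | (canonical, equivalents) :: rest, w =>
      if w == canonical || equivalents.contains w then some canonical else findEquiv rest w

def normalize_semantic (text : String) : String :=
  let words := PySem.Str.split₀ (PySem.Str.lower text)
  let normalized := words.foldl (fun acc word =>
    let word_clean := PySem.Str.strip word
    match findEquiv EQUIVALENT_WORDS word_clean with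
    | some canonical => acc ++ [canonical]
    | none => acc ++ [word_clean]) []
  PySem.Str.join " " normalized

-- ===== PORT B =====
def SYNONYM_GROUPS : List (List String) := [
  ["este", "esse", "aquele"],
  ["esta", "essa", "aquela"],
  ["estes", "esses", "aqueles"],
  ["estas", "essas", "aquelas"],
  ["você", "tu", "voce"],
  ["vocês", "vós", "voces"],
  ["o", "a"],
  ["os", "as"],
  ["na", "no"],
  ["da", "do"],
  ["this", "that", "these", "those"]]

-- Source B's module-level table build: for each group, map every member to group[0]
-- (group[0] via headD ""; every group is a nonempty literal, so this is exact)
def CANON : PySem.Dict String String :=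
  SYNONYM_GROUPS.foldl (fun d group =>
    let canonical := group.headD ""
    group.foldl (fun d w => d.insert w canonical) d) PySem.Dict.empty

def normalize_semantic_alt (text : String) : String :=
  PySem.Str.join " "
    ((PySem.Str.split₀ (PySem.Str.lower text)).map (fun w => CANON.getD w w))

-- ===== PRECONDITION & SPEC =====
def Spec_normalize_semantic (text : String) (out : String) : Prop := out = normalize_semantic_alt text
instance (text : String) (out : String) : Decidable (Spec_normalize_semantic text out) := by unfold Spec_normalize_semantic; infer_instance

-- ===== CLAIM (what is proved, stated in full; the proofs are below) =====
def Claim_equal_normalize_semantic : Prop := ∀ (text : String), Dom_normalize_semantic text → Spec_normalize_semantic text (normalize_semantic text)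

-- ===== LEMMAS AND PROOFS =====

-- all words occurring in the tables, in CANON's insertion order
def ALL_KEYS : List String :=
  ["este", "esse", "aquele", "esta", "essa", "aquela",
   "estes", "esses", "aqueles", "estas", "essas", "aquelas",
   "você", "tu", "voce", "vocês", "vós", "voces",
   "o", "a", "os", "as", "na", "no", "da", "do",
   "this", "that", "these", "those"]

theorem canonical_get? (w : String) : CANON.get? w = findEquiv EQUIVALENT_WORDS w := by
  by_cases hw : w ∈ ALL_KEYS
  · fin_cases hw <;> decide
  · simp [ALL_KEYS] at hw
    obtain ⟨h1,h2,h3,h4,h5,h6,h7,h8,h9,h10,h11,h12,h13,h14,h15,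
      h16,h17,h18,h19,h20,h21,h22,h23,h24,h25,h26,h27,h28,h29,h30⟩ := hw
    simp [CANON, SYNONYM_GROUPS, findEquiv, EQUIVALENT_WORDS,
      PySem.Dict.get?, PySem.Dict.insert, PySem.Dict.empty, *]
    exact ⟨Ne.symm h1, Ne.symm h2, Ne.symm h3, Ne.symm h4, Ne.symm h5, Ne.symm h6,
      Ne.symm h7, Ne.symm h8, Ne.symm h9, Ne.symm h10, Ne.symm h11, Ne.symm h12,
      Ne.symm h13, Ne.symm h14, Ne.symm h15, Ne.symm h16, Ne.symm h17, Ne.symm h18,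
      Ne.symm h19, Ne.symm h20, Ne.symm h21, Ne.symm h22, Ne.symm h23, Ne.symm h24,
      Ne.symm h25, Ne.symm h26, Ne.symm h27, Ne.symm h28, Ne.symm h29, Ne.symm h30⟩

theorem canonical_getD (w : String) :
    CANON.getD w w = (findEquiv EQUIVALENT_WORDS w).getD w := by
  rw [PySem.Dict.getD_eq_get?_getD, canonical_get?]

theorem split₀_go_nospace :
    ∀ (s cur : List Char) (acc : List (List Char)),
      (∀ c ∈ cur, PySem.Chars.isspace c = false) →
      (∀ t ∈ acc, ∀ c ∈ t, PySem.Chars.isspace c = false) →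
      ∀ t ∈ PySem.Chars.split₀.go s cur acc, ∀ c ∈ t, PySem.Chars.isspace c = false := by
  intro s
  induction s with
  | nil =>
    intro cur acc hcur hacc t ht
    simp only [PySem.Chars.split₀.go] at ht
    split at ht
    · exact hacc t (by simpa using ht)
    · rcases List.mem_cons.mp (List.mem_reverse.mp ht) with h | h
      · intro c hc; exact hcur c (List.mem_reverse.mp (h ▸ hc))
      · exact hacc t h
  | cons ch rest ih =>
    intro cur acc hcur hacc t ht
    rw [PySem.Chars.split₀.go] at ht
    by_cases hsp : PySem.Chars.isspace ch = true
    · rw [if_pos hsp] at ht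
      split at ht
      · exact ih [] acc (by simp) hacc t ht
      · refine ih [] (cur.reverse :: acc) (by simp) ?_ t ht
        intro u hu c hc
        rcases List.mem_cons.mp hu with hu | hu
        · exact hcur c (List.mem_reverse.mp (hu ▸ hc))
        · exact hacc u hu c hc
    · rw [if_neg hsp] at ht
      refine ih (ch :: cur) acc ?_ hacc t ht
      intro c hc
      rcases List.mem_cons.mp hc with hc | hc
      · subst hc; simpa using hsp
      · exact hcur c hc

theorem strip_of_nospace (cs : List Char)
    (h : ∀ c ∈ cs, PySem.Chars.isspace c = false) : PySem.Chars.strip cs = cs := by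
  have hl : PySem.Chars.lstrip cs = cs :=
    List.dropWhile_eq_self_iff.mpr (fun hne => by
      simp only [Bool.not_eq_true]; exact h _ (List.getElem_mem hne))
  simp only [PySem.Chars.strip, hl, PySem.Chars.rstrip]
  rw [List.dropWhile_eq_self_iff.mpr (fun hne => by
      have hm : cs.reverse[0] ∈ cs := List.mem_reverse.mp (List.getElem_mem hne)
      simp only [Bool.not_eq_true]
      exact h _ hm)]
  exact List.reverse_reverse cs

theorem strip_token (s w : String) (hw : w ∈ PySem.Str.split₀ s) :
    PySem.Str.strip w = w := by
  have hmem : w.toList ∈ PySem.Chars.split₀ s.toList := by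
    rw [← PySem.Str.split₀_map_toList s]
    exact List.mem_map_of_mem hw
  have hns : ∀ c ∈ w.toList, PySem.Chars.isspace c = false :=
    split₀_go_nospace s.toList [] [] (by simp) (by simp) w.toList
      (by simpa [PySem.Chars.split₀] using hmem)
  exact String.toList_injective (by rw [PySem.Str.toList_strip]; exact strip_of_nospace _ hns)

-- ===== VERDICT (by name: the statement is the Claim_ definition above) =====
theorem normalize_semantic_spec : Claim_equal_normalize_semantic := by
  intro text _
  unfold Spec_normalize_semantic normalize_semantic normalize_semantic_alt
  dsimp only
  rw [PySem.List.foldl_congr_mem _ _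
      (fun acc word => acc ++ [CANON.getD word word]) []
      (fun acc w hw => by
        rw [strip_token _ w hw]
        cases h : findEquiv EQUIVALENT_WORDS w <;> simp [h, canonical_getD]),
    PySem.List.foldl_append_singleton_eq_map]
  simp
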